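-- pv_equiv track=rewrite | github.com/Unidecimal/advent-of-code | 2015/p5/main.py | is_nice_or_naughty
-- ===== SOURCE A (Python) =====
-- def is_nice_or_naughty(suspect_str):
--     for forbidden in ["ab", "cd", "pq", "xy"]:
--         if suspect_str.count(forbidden):
--             return "naughty"
--
--     vowel_count = 0
--     double_letter = 0
--     last_letter = ""
--
--     for letter in suspect_str:
--         if letter in "aeiou":
--             vowel_count += 1
--
--         if letter == last_letter:
--             double_letter += 1
--
--         last_letter = letter
--
--     if vowel_count > 2 and double_letter > 0:
--         return "nice"
--     return "naughty"
-- ===== SOURCE B (Python) =====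
-- def is_nice_or_naughty(suspect_str):
--     if any(f in suspect_str for f in ("ab", "cd", "pq", "xy")):
--         return "naughty"
--     if sum(suspect_str.count(v) for v in "aeiou") < 3:
--         return "naughty"
--     if not any(c + c in suspect_str for c in set(suspect_str)):
--         return "naughty"
--     return "nice"
-- ===== Notes on version B (the rewrite author's own statement) =====
-- stated objective: alternative
-- what changed: Replaces A's fused stateful character loop (vowel counter, double counter, last-letter accumulator) with stateless queries composed as guard clauses: any() over the four forbidden substrings, a per-vowel sum of str.count for each of the five vowels, and a doubled-letter test asking whether some character of set(suspect_str) occurs doubled as a substring.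
import Mathlib
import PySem

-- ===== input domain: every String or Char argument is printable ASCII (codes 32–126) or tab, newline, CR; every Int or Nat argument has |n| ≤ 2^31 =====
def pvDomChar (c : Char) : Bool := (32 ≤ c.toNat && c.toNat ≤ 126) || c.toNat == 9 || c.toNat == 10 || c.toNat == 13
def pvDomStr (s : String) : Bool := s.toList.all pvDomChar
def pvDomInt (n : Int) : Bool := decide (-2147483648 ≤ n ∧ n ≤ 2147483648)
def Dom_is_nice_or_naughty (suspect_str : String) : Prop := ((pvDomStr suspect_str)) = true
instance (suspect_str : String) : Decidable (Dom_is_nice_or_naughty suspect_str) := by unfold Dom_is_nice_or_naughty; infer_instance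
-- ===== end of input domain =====

-- B replaces A's fused stateful character loop (vowel/double counters + last_letter) by
-- independent substring/count queries: any() over forbidden substrings, a per-vowel sum of
-- s.count(v), and a doubled-letter test 'c+c in s' over set(s); same values, intended constant-factor speedup (C-level scans instead of a per-character Python loop).


-- ===== PORT A =====
-- the 'for forbidden in [...]' loop with its early return
def pvForbiddenLoop (s : String) : List String → Option String
  | [] => none
  | f :: rest => if PySem.Str.count s f ≠ 0 then some "naughty" else pvForbiddenLoop s rest

-- one iteration of A's character loop; state = (vowel_count, double_letter, last_letter)
-- (last_letter is the Python one-char string, modelled as a List Char; initially "")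
def pvStepA (acc : Int × Int × List Char) (letter : Char) : Int × Int × List Char :=
  let v := if letter ∈ "aeiou".toList then acc.1 + 1 else acc.1
  let d := if [letter] = acc.2.2 then acc.2.1 + 1 else acc.2.1
  (v, d, [letter])

def is_nice_or_naughty (suspect_str : String) : String :=
  match pvForbiddenLoop suspect_str ["ab", "cd", "pq", "xy"] with
  | some r => r
  | none =>
    let st := suspect_str.toList.foldl pvStepA (0, 0, [])
    if st.1 > 2 ∧ st.2.1 > 0 then "nice" else "naughty"

-- ===== PORT B =====
def is_nice_or_naughty_alt (suspect_str : String) : String :=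
  if ["ab", "cd", "pq", "xy"].any (fun f => PySem.Str.isIn f suspect_str) then "naughty"
  else if ("aeiou".toList.map (fun v => PySem.Chars.count suspect_str.toList [v])).sum < 3 then
    "naughty"
  else if ¬ ((PySem.Set.ofList suspect_str.toList).any
      (fun c => PySem.Chars.isIn [c, c] suspect_str.toList)) = true then "naughty"
  else "nice"

-- ===== PRECONDITION & SPEC =====
def Spec_is_nice_or_naughty (suspect_str : String) (out : String) : Prop := out = is_nice_or_naughty_alt suspect_str
instance (suspect_str : String) (out : String) : Decidable (Spec_is_nice_or_naughty suspect_str out) := by unfold Spec_is_nice_or_naughty; infer_instance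

-- ===== CLAIM (what is proved, stated in full; the proofs are below) =====
def Claim_equal_is_nice_or_naughty : Prop := ∀ (suspect_str : String), Dom_is_nice_or_naughty suspect_str → Spec_is_nice_or_naughty suspect_str (is_nice_or_naughty suspect_str)

-- ===== LEMMAS AND PROOFS =====

-- the accumulator never decreases in Chars.count's worker
lemma pv_go_mono (sub : List Char) (fuel : Nat) :
    ∀ l acc, acc ≤ PySem.Chars.count.go sub fuel l acc := by
  induction fuel with
  | zero => intro l acc; simp [PySem.Chars.count.go]
  | succ n ih =>
    intro l acc
    cases l with
    | nil => simp [PySem.Chars.count.go]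
    | cons h t =>
      rw [PySem.Chars.count.go]
      split
      · exact le_trans (Nat.le_succ acc) (ih _ _)
      · exact ih _ _

-- Chars.count's worker moves past its accumulator iff some occurrence of sub remains
lemma pv_go_ne (sub : List Char) (hsub : sub ≠ []) (fuel : Nat) :
    ∀ l acc, l.length ≤ fuel →
      (PySem.Chars.count.go sub fuel l acc ≠ acc ↔ ∃ j, sub <+: l.drop j) := by
  induction fuel with
  | zero =>
    intro l acc hl
    have hnil : l = [] := List.eq_nil_of_length_eq_zero (Nat.le_zero.mp hl)
    subst hnil
    simp [PySem.Chars.count.go, List.prefix_nil, hsub]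
  | succ n ih =>
    intro l acc hl
    cases l with
    | nil => simp [PySem.Chars.count.go, List.prefix_nil, hsub]
    | cons h t =>
      rw [PySem.Chars.count.go]
      split
      · rename_i hpre
        constructor
        · intro _
          exact ⟨0, by simpa using List.isPrefixOf_iff_prefix.mp hpre⟩
        · intro _
          have := pv_go_mono sub n (List.drop sub.length (h :: t)) (acc + 1)
          omega
      · rename_i hpre
        have hnp : ¬ sub <+: (h :: t) := fun hc => hpre (List.isPrefixOf_iff_prefix.mpr hc)
        have ht : t.length ≤ n := by simpa using Nat.le_of_succ_le_succ (by simpa using hl)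
        rw [ih t acc ht]
        constructor
        · rintro ⟨j, hj⟩; exact ⟨j + 1, by simpa using hj⟩
        · rintro ⟨j, hj⟩
          cases j with
          | zero => exact absurd (by simpa using hj) hnp
          | succ k => exact ⟨k, by simpa using hj⟩

-- A's truthiness test 'if s.count(sub):' is B's membership test 'sub in s'
lemma pv_count_ne_zero (s sub : List Char) (hsub : sub ≠ []) :
    PySem.Chars.count s sub ≠ 0 ↔ PySem.Chars.isIn sub s = true := by
  unfold PySem.Chars.count
  rw [if_neg (by simpa [List.isEmpty_iff] using hsub)]
  rw [pv_go_ne sub hsub s.length s 0 le_rfl]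
  exact PySem.Chars.exists_prefix_drop_iff_isIn sub s

-- A's forbidden loop, evaluated: it fires exactly when B's any() does
lemma pv_forb (s : String) :
    pvForbiddenLoop s ["ab", "cd", "pq", "xy"]
      = (if ["ab", "cd", "pq", "xy"].any (fun f => PySem.Str.isIn f s) then some "naughty"
         else none) := by
  have hab := pv_count_ne_zero s.toList "ab".toList (by decide)
  have hcd := pv_count_ne_zero s.toList "cd".toList (by decide)
  have hpq := pv_count_ne_zero s.toList "pq".toList (by decide)
  have hxy := pv_count_ne_zero s.toList "xy".toList (by decide)
  simp only [pvForbiddenLoop, PySem.Str.count_eq, PySem.Str.isIn_eq, hab, hcd, hpq, hxy,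
    List.any_cons, List.any_nil]
  split_ifs <;> simp_all

-- on a single-character needle Chars.count's worker counts plain occurrences
lemma pv_go_single (v : Char) (fuel : Nat) :
    ∀ l acc, l.length ≤ fuel →
      PySem.Chars.count.go [v] fuel l acc = acc + l.count v := by
  induction fuel with
  | zero =>
    intro l acc hl
    have hnil : l = [] := List.eq_nil_of_length_eq_zero (Nat.le_zero.mp hl)
    subst hnil
    simp [PySem.Chars.count.go]
  | succ n ih =>
    intro l acc hl
    cases l with
    | nil => simp [PySem.Chars.count.go]
    | cons h t =>
      have ht : t.length ≤ n := by simpa using Nat.le_of_succ_le_succ (by simpa using hl)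
      rw [PySem.Chars.count.go]
      split
      · rename_i hpre
        have hv : v = h := by
          have := List.isPrefixOf_iff_prefix.mp hpre
          simpa [List.cons_prefix_cons] using this
        subst hv
        rw [show List.drop ([v] : List Char).length (v :: t) = t from by simp,
          ih t (acc + 1) ht]
        simp
        omega
      · rename_i hpre
        have hv : ¬ v = h := by
          intro hc; subst hc
          exact hpre (List.isPrefixOf_iff_prefix.mpr (by simp [List.cons_prefix_cons]))
        rw [ih t acc ht]
        simp [Ne.symm hv]

-- s.count(v) for a one-character string is List.count
lemma pv_count_single (s : List Char) (v : Char) :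
    PySem.Chars.count s [v] = s.count v := by
  unfold PySem.Chars.count
  rw [if_neg (by simp)]
  simpa using pv_go_single v s.length s 0 le_rfl

-- splitting a membership filter over the head of a duplicate-free needle list
lemma pv_filter_cons (v : Char) (vs : List Char) (hv : v ∉ vs) (s : List Char) :
    (s.filter (fun c => c ∈ v :: vs)).length
      = s.count v + (s.filter (fun c => c ∈ vs)).length := by
  induction s with
  | nil => simp
  | cons h t ih =>
    simp only [List.filter_cons, List.count_cons, List.mem_cons]
    by_cases hh : h = v <;> by_cases hm : h ∈ vs <;> simp_all <;> omega

-- A's single-pass vowel tally equals B's per-vowel sum of s.count(v)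
lemma pv_vowels (s : List Char) :
    (s.filter (fun c => c ∈ "aeiou".toList)).length
      = ("aeiou".toList.map (fun v => PySem.Chars.count s [v])).sum := by
  simp only [pv_count_single]
  show (s.filter (fun c => c ∈ ['a','e','i','o','u'])).length
      = (['a','e','i','o','u'].map (fun v => s.count v)).sum
  rw [pv_filter_cons 'a' _ (by decide), pv_filter_cons 'e' _ (by decide),
    pv_filter_cons 'i' _ (by decide), pv_filter_cons 'o' _ (by decide),
    pv_filter_cons 'u' _ (by decide)]
  simp

-- proof-side reading of A's double-letter detection: a double starting from context prev
def pvAdjFrom (prev : List Char) : List Char → Bool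
  | [] => false
  | c :: rest => (decide ([c] = prev)) || pvAdjFrom [c] rest

lemma pv_adj_infix (cs : List Char) : ∀ c : Char,
    (pvAdjFrom [c] cs = true ↔ ∃ x, [x, x] <:+: (c :: cs)) := by
  induction cs with
  | nil =>
    intro c
    simp only [pvAdjFrom, Bool.false_eq_true, false_iff]
    rintro ⟨x, hx⟩
    have := List.IsInfix.length_le hx
    simp at this
  | cons d t ih =>
    intro c
    simp only [pvAdjFrom, Bool.or_eq_true, decide_eq_true_eq, ih d]
    constructor
    · rintro (h | ⟨x, hx⟩)
      · have hdc : d = c := by simpa using h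
        subst hdc
        exact ⟨d, ⟨[], t, by simp⟩⟩
      · exact ⟨x, List.infix_cons hx⟩
    · rintro ⟨x, hx⟩
      rcases List.infix_cons_iff.mp hx with hp | hi
      · left
        rcases List.cons_prefix_cons.mp hp with ⟨hxc, hp2⟩
        rcases List.cons_prefix_cons.mp hp2 with ⟨hxd, _⟩
        simp [← hxc, ← hxd]
      · right; exact ⟨x, hi⟩

lemma pv_adj_nil (cs : List Char) :
    (pvAdjFrom [] cs = true ↔ ∃ x, [x, x] <:+: cs) := by
  cases cs with
  | nil =>
    simp only [pvAdjFrom, Bool.false_eq_true, false_iff]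
    rintro ⟨x, hx⟩
    have := List.IsInfix.length_le hx
    simp at this
  | cons c rest => simpa [pvAdjFrom] using pv_adj_infix rest c

-- B's doubled-letter membership scan over set(s), as the same existential
lemma pv_double_alt (s : List Char) :
    ((PySem.Set.ofList s).any (fun c => PySem.Chars.isIn [c, c] s) = true)
      ↔ ∃ x, [x, x] <:+: s := by
  rw [List.any_eq_true]
  constructor
  · rintro ⟨c, _, hc⟩
    exact ⟨c, (PySem.Chars.isIn_iff_infix _ _).mp hc⟩
  · rintro ⟨x, hx⟩
    have hxmem : x ∈ s := hx.subset (by simp)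
    exact ⟨x, (PySem.Set.mem_ofList s x).mpr hxmem, (PySem.Chars.isIn_iff_infix _ _).mpr hx⟩

-- invariant of A's character loop
lemma pv_foldA (cs : List Char) : ∀ (v0 d0 : Int) (prev : List Char), 0 ≤ d0 →
    (cs.foldl pvStepA (v0, d0, prev)).1
        = v0 + ((cs.filter (fun c => c ∈ "aeiou".toList)).length : Int)
      ∧ (0 < (cs.foldl pvStepA (v0, d0, prev)).2.1 ↔ 0 < d0 ∨ pvAdjFrom prev cs = true) := by
  induction cs with
  | nil => intro v0 d0 prev h; simp [pvAdjFrom]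
  | cons c rest ih =>
    intro v0 d0 prev h
    simp only [List.foldl_cons, pvStepA]
    by_cases hv : c ∈ "aeiou".toList <;> by_cases hd : [c] = prev
    · rw [if_pos hv, if_pos hd]
      obtain ⟨h1, h2⟩ := ih (v0 + 1) (d0 + 1) [c] (by omega)
      refine ⟨by rw [h1, List.filter_cons, if_pos (by simpa using hv)]; simp only [List.length_cons]; push_cast; ring, ?_⟩
      rw [h2]
      constructor
      · intro _; right; simp [pvAdjFrom, hd]
      · intro _; left; omega
    · rw [if_pos hv, if_neg hd]
      obtain ⟨h1, h2⟩ := ih (v0 + 1) d0 [c] h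
      refine ⟨by rw [h1, List.filter_cons, if_pos (by simpa using hv)]; simp only [List.length_cons]; push_cast; ring, ?_⟩
      rw [h2]; simp [pvAdjFrom, hd]
    · rw [if_neg hv, if_pos hd]
      obtain ⟨h1, h2⟩ := ih v0 (d0 + 1) [c] (by omega)
      refine ⟨by rw [h1, List.filter_cons, if_neg (by simpa using hv)], ?_⟩
      rw [h2]
      constructor
      · intro _; right; simp [pvAdjFrom, hd]
      · intro _; left; omega
    · rw [if_neg hv, if_neg hd]
      obtain ⟨h1, h2⟩ := ih v0 d0 [c] h
      refine ⟨by rw [h1, List.filter_cons, if_neg (by simpa using hv)], ?_⟩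
      rw [h2]; simp [pvAdjFrom, hd]

-- ===== VERDICT (by name: the statement is the Claim_ definition above) =====
-- collapsing B's guard chain of two 'naughty' early returns into one conjunction
lemma pv_chain (a c : Prop) [Decidable a] [Decidable c] :
    (if a then "naughty" else if c then "naughty" else "nice")
      = (if (¬ a ∧ ¬ c) then "nice" else "naughty") := by
  by_cases ha : a <;> by_cases hc : c <;> simp [ha, hc]

theorem is_nice_or_naughty_spec : Claim_equal_is_nice_or_naughty := by
  intro s _hdom
  unfold Spec_is_nice_or_naughty is_nice_or_naughty is_nice_or_naughty_alt
  rw [pv_forb s]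
  by_cases hforb : (["ab", "cd", "pq", "xy"].any (fun f => PySem.Str.isIn f s)) = true
  · rw [if_pos hforb, if_pos hforb]
  · rw [if_neg hforb, if_neg hforb]
    obtain ⟨h1, h2⟩ := pv_foldA s.toList 0 0 [] le_rfl
    rw [pv_chain]
    have hcond :
        ((s.toList.foldl pvStepA (0, 0, [])).1 > 2 ∧ (s.toList.foldl pvStepA (0, 0, [])).2.1 > 0)
          ↔ (¬ ("aeiou".toList.map (fun v => PySem.Chars.count s.toList [v])).sum < 3
              ∧ ¬ ¬ ((PySem.Set.ofList s.toList).any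
                  (fun c => PySem.Chars.isIn [c, c] s.toList)) = true) := by
      constructor
      · rintro ⟨ha, hb⟩
        rw [h1] at ha
        refine ⟨by rw [← pv_vowels]; omega, not_not.mpr ((pv_double_alt _).mpr
          ((pv_adj_nil s.toList).mp ((h2.mp hb).resolve_left (by omega))))⟩
      · rintro ⟨ha, hb⟩
        have hb' := not_not.mp hb
        rw [← pv_vowels] at ha
        exact ⟨by rw [h1]; omega,
          h2.mpr (Or.inr ((pv_adj_nil s.toList).mpr ((pv_double_alt s.toList).mp hb')))⟩
    rw [if_congr hcond rfl rfl]
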